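-- pv_equiv track=rewrite | github.com/Ridge19/Algorithms-Sem1-2025 | Greedy Algorithms/Huffman/huffman_coding.py | calculate_sizes
-- ===== SOURCE A (Python) =====
-- def calculate_sizes(inputString, code_map):
--     """
--     Calculates the byte size before and after compression.
--     Returns (original_size_bytes, compressed_size_bytes)
--     """
--     # Original size: 8 bits per character
--     original_bits = len(inputString) * 8
--     original_bytes = (original_bits + 7) // 8
--
--     # Compressed size: sum of codeword lengths * frequency
--     compressed_bits = 0
--     freq = {}
--     for ch in inputString:
--         freq[ch] = freq.get(ch, 0) + 1
--     for ch in freq: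
--         compressed_bits += freq[ch] * len(code_map[ch])
--     compressed_bytes = (compressed_bits + 7) // 8
--
--     return original_bytes, compressed_bytes
-- ===== SOURCE B (Python) =====
-- def calculate_sizes(inputString, code_map):
--     """
--     Calculates the byte size before and after compression.
--     Returns (original_size_bytes, compressed_size_bytes)
--     """
--     original_bytes = (len(inputString) * 8 + 7) // 8
--     compressed_bits = sum(len(code_map[ch]) for ch in inputString)
--     compressed_bytes = (compressed_bits + 7) // 8
--     return original_bytes, compressed_bytes
-- ===== Notes on version B (the rewrite author's own statement) =====
-- stated objective: simpler
-- what changed: B drops A's two-phase tally-then-aggregate (frequency dict built over the string, then a loop over unique keys summing freq*codelen) and computes the compressed bit count in one direct pass summing len(code_map[ch]) per character.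
import Mathlib
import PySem

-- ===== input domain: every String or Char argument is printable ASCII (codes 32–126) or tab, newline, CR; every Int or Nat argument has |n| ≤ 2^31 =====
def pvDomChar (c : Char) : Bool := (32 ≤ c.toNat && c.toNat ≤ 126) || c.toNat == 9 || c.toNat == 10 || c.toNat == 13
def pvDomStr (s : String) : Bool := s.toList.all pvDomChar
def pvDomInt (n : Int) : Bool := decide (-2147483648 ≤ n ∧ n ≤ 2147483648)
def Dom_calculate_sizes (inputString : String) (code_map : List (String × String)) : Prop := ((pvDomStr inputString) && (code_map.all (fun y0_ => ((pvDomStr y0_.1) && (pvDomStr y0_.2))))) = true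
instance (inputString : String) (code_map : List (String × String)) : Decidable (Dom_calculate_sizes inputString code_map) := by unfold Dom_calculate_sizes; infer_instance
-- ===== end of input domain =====

-- B drops A's frequency dictionary: one direct pass sums len(code_map[ch]) per character (objective: simpler).

-- ===== PORT A =====
-- literal transliteration of A: frequency dict built with get(..,0)+1, then a loop over
-- the dict's keys accumulating freq[ch] * len(code_map[ch]).
def calculate_sizes (inputString : String) (code_map : List (String × String)) : Int × Int :=
  let original_bits : Int := PySem.Str.len inputString * 8
  let original_bytes : Int := PySem.Int.floordiv (original_bits + 7) 8
  let cmd : PySem.Dict String String := PySem.Dict.mk code_map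
  -- for ch in inputString: freq[ch] = freq.get(ch, 0) + 1   (each ch is a 1-char string)
  let freq : PySem.Dict String Int :=
    (inputString.toList.map String.singleton).foldl
      (fun d ch => d.insert ch (d.getD ch 0 + 1)) PySem.Dict.empty
  -- for ch in freq: compressed_bits += freq[ch] * len(code_map[ch])
  -- (code_map[ch] raises KeyError on a missing key: Pre_ excludes that; getD "" is the total stand-in)
  let compressed_bits : Int :=
    freq.items.foldl (fun acc p => acc + p.2 * PySem.Str.len (cmd.getD p.1 "")) 0
  let compressed_bytes : Int := PySem.Int.floordiv (compressed_bits + 7) 8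
  (original_bytes, compressed_bytes)

-- ===== PORT B =====
-- literal transliteration of B: one pass, sum(len(code_map[ch]) for ch in inputString).
def calculate_sizes_alt (inputString : String) (code_map : List (String × String)) : Int × Int :=
  let original_bytes : Int := PySem.Int.floordiv (PySem.Str.len inputString * 8 + 7) 8
  let compressed_bits : Int :=
    (inputString.toList.map
      (fun c => PySem.Str.len ((PySem.Dict.mk code_map).getD (String.singleton c) ""))).sum
  let compressed_bytes : Int := PySem.Int.floordiv (compressed_bits + 7) 8
  (original_bytes, compressed_bytes)

-- ===== PRECONDITION & SPEC =====
-- Pre_: every character of inputString has an entry in code_map — exactly where Python's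
-- code_map[ch] does not raise KeyError (both A and B raise outside it).
def Pre_calculate_sizes (inputString : String) (code_map : List (String × String)) : Prop :=
  (inputString.toList.all (fun c => (PySem.Dict.mk code_map).contains (String.singleton c))) = true
instance (inputString : String) (code_map : List (String × String)) : Decidable (Pre_calculate_sizes inputString code_map) := by unfold Pre_calculate_sizes; infer_instance

def pvWitness_calculate_sizes : String × (List (String × String)) :=
  ("abba", [("a", "0"), ("b", "11")])

def Spec_calculate_sizes (inputString : String) (code_map : List (String × String)) (out : Int × Int) : Prop := out = calculate_sizes_alt inputString code_map
instance (inputString : String) (code_map : List (String × String)) (out : Int × Int) : Decidable (Spec_calculate_sizes inputString code_map out) := by unfold Spec_calculate_sizes; infer_instance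

-- ===== CLAIM (what is proved, stated in full; the proofs are below) =====
def Claim_equal_calculate_sizes : Prop := ∀ (inputString : String) (code_map : List (String × String)), Dom_calculate_sizes inputString code_map → Pre_calculate_sizes inputString code_map → Spec_calculate_sizes inputString code_map (calculate_sizes inputString code_map)

-- ===== LEMMAS AND PROOFS =====

-- a set with x removed, plus x in front, is a permutation of the set (when x was a member)
lemma perm_cons_discard (s : PySem.Set String) (x : String) (hnd : s.Nodup) (hx : x ∈ s) :
    s.Perm (x :: PySem.Set.discard s x) := by
  have hndd : (PySem.Set.discard s x).Nodup := PySem.Set.nodup_discard s x hnd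
  apply (List.perm_ext_iff_of_nodup hnd ?_).2
  · intro y
    simp only [List.mem_cons, PySem.Set.mem_discard]
    constructor
    · intro hy; by_cases h : y = x
      · exact Or.inl h
      · exact Or.inr ⟨hy, h⟩
    · rintro (rfl | ⟨hy, _⟩) <;> [exact hx; exact hy]
  · exact List.nodup_cons.2 ⟨fun h => ((PySem.Set.mem_discard s x x).1 h).2 rfl, hndd⟩

lemma perm_discard_of_not_mem (s : PySem.Set String) (x : String) (hnd : s.Nodup) (hx : x ∉ s) :
    s.Perm (PySem.Set.discard s x) := by
  apply (List.perm_ext_iff_of_nodup hnd (PySem.Set.nodup_discard s x hnd)).2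
  intro y
  simp only [PySem.Set.mem_discard]
  exact ⟨fun hy => ⟨hy, fun h => hx (h ▸ hy)⟩, fun h => h.1⟩

-- aggregating weights over unique elements with multiplicities equals the direct sum
lemma sum_count_ofList (w : String → Int) (xs : List String) :
    ((PySem.Set.ofList xs).map (fun k => ((List.count k xs : Int)) * w k)).sum
      = (xs.map w).sum := by
  induction xs with
  | nil => simp
  | cons x xs ih =>
    rw [PySem.Set.ofList_cons]
    have hc : ∀ k, (List.count k (x :: xs) : Int)
        = (List.count k xs : Int) + (if k = x then 1 else 0) := by
      intro k; by_cases h : k = x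
      · simp [h]
      · have h' : ¬x = k := fun hh => h hh.symm
        simp [h, h']
    have hmapD : (PySem.Set.discard (PySem.Set.ofList xs) x).map
          (fun k => ((List.count k (x :: xs) : Int)) * w k)
        = (PySem.Set.discard (PySem.Set.ofList xs) x).map
          (fun k => ((List.count k xs : Int)) * w k) := by
      apply List.map_congr_left
      intro k hk
      have hne : k ≠ x := ((PySem.Set.mem_discard _ _ _).1 hk).2
      rw [hc k, if_neg hne, add_zero]
    by_cases hx : x ∈ PySem.Set.ofList xs
    · have hperm := (perm_cons_discard _ x (PySem.Set.nodup_ofList xs) hx).map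
        (fun k => ((List.count k xs : Int)) * w k)
      have hsum := hperm.sum_eq
      simp only [List.map_cons, List.sum_cons] at hsum ⊢
      rw [hc x, if_pos rfl, hmapD, ← ih, hsum]
      ring
    · have hxs : x ∉ xs := by simpa [PySem.Set.mem_ofList] using hx
      have hperm := (perm_discard_of_not_mem _ x (PySem.Set.nodup_ofList xs) hx).map
        (fun k => ((List.count k xs : Int)) * w k)
      simp only [List.map_cons, List.sum_cons]
      rw [hc x, if_pos rfl, hmapD, ← ih, hperm.sum_eq, List.count_eq_zero.2 hxs]
      ring

-- ===== VERDICT (by name: the statement is the Claim_ definition above) =====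
theorem calculate_sizes_spec : Claim_equal_calculate_sizes := by
  intro s cm _ _
  unfold Spec_calculate_sizes calculate_sizes calculate_sizes_alt
  simp only [PySem.Dict.foldl_insert_getD_add_one_eq_counter, PySem.List.foldl_add,
    PySem.Dict.items_counter, List.map_map, zero_add]
  have := sum_count_ofList
    (fun k => PySem.Str.len ((PySem.Dict.mk cm).getD k "")) (s.toList.map String.singleton)
  simp only [Function.comp_def]
  rw [this]
  simp [List.map_map, Function.comp_def]
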